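-- pv_equiv track=rewrite | github.com/raghavsinha/CSE175 | lgame.py | compareLCoords
-- ===== SOURCE A (Python) =====
-- def compareLCoords(lCoords1, lCoords2):
--     for c1 in lCoords1:
--         foundMatch = False
--         for c2 in lCoords2:
--             if(c1[0] == c2[0] and c1[1] == c2[1]):
--                 foundMatch = True
--                 break
--         if(not foundMatch):
--             return False
--     return True
-- ===== SOURCE B (Python) =====
-- def compareLCoords(lCoords1, lCoords2):
--     pending = {(c[0], c[1]) for c in lCoords1}
--     for c in lCoords2:
--         pending.discard((c[0], c[1]))
--         if not pending:
--             return True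
--     return not pending
-- ===== Notes on version B (the rewrite author's own statement) =====
-- stated objective: faster
-- what changed: Inverts the traversal: builds a pending set of lCoords1's coordinate pairs once, then a single pass over lCoords2 discards each seen pair and returns True as soon as the pending set empties; A instead rescans lCoords2 for every element of lCoords1.
import Mathlib
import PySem

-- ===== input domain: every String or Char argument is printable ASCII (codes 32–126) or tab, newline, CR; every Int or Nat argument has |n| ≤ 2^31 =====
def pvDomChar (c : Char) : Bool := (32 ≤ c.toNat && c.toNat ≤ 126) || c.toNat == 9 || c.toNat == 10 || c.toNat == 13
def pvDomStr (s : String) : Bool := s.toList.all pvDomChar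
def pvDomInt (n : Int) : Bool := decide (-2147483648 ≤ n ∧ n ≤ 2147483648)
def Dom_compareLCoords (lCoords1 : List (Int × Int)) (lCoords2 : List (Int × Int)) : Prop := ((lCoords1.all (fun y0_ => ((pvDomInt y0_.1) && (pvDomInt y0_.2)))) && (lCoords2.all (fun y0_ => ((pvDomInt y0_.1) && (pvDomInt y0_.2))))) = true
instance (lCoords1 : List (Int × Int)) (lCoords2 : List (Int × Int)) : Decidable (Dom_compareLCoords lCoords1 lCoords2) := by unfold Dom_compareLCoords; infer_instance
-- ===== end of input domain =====

-- B inverts the traversal: one pass over lCoords2 discards pairs from a pending set built from lCoords1, returning True when it empties (objective: faster).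

-- ===== PORT A =====
-- A's inner loop over lCoords2: foundMatch becomes true (and breaks) on the first c2 matching c1 in both components.
def compareLCoordsInner (c1 : Int × Int) : List (Int × Int) → Bool
  | [] => false
  | c2 :: rest => if c1.1 == c2.1 && c1.2 == c2.2 then true else compareLCoordsInner c1 rest

def compareLCoords (lCoords1 : List (Int × Int)) (lCoords2 : List (Int × Int)) : Bool :=
  match lCoords1 with
  | [] => true
  | c1 :: rest => if ¬ compareLCoordsInner c1 lCoords2 then false else compareLCoords rest lCoords2

-- ===== PORT B =====
-- B's loop over lCoords2: discard each pair from the pending set, early-return True when it empties.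
def compareLCoordsAltLoop (pending : PySem.Set (Int × Int)) : List (Int × Int) → Bool
  | [] => pending.isEmpty
  | c :: rest =>
      let p := PySem.Set.discard pending (c.1, c.2)
      if p.isEmpty then true else compareLCoordsAltLoop p rest

def compareLCoords_alt (lCoords1 : List (Int × Int)) (lCoords2 : List (Int × Int)) : Bool :=
  compareLCoordsAltLoop (PySem.Set.ofList (lCoords1.map (fun c => (c.1, c.2)))) lCoords2

-- ===== PRECONDITION & SPEC =====
def Spec_compareLCoords (lCoords1 : List (Int × Int)) (lCoords2 : List (Int × Int)) (out : Bool) : Prop := out = compareLCoords_alt lCoords1 lCoords2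
instance (lCoords1 : List (Int × Int)) (lCoords2 : List (Int × Int)) (out : Bool) : Decidable (Spec_compareLCoords lCoords1 lCoords2 out) := by unfold Spec_compareLCoords; infer_instance

-- ===== CLAIM (what is proved, stated in full; the proofs are below) =====
def Claim_equal_compareLCoords : Prop := ∀ (lCoords1 : List (Int × Int)) (lCoords2 : List (Int × Int)), Dom_compareLCoords lCoords1 lCoords2 → Spec_compareLCoords lCoords1 lCoords2 (compareLCoords lCoords1 lCoords2)

-- ===== LEMMAS AND PROOFS =====
lemma inner_eq_mem (c1 : Int × Int) (l2 : List (Int × Int)) :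
    compareLCoordsInner c1 l2 = decide (c1 ∈ l2) := by
  induction l2 with
  | nil => simp [compareLCoordsInner]
  | cons c2 rest ih =>
    simp only [compareLCoordsInner, ih]
    by_cases h : c1 = c2
    · subst h; simp
    · have : ¬ (c1.1 == c2.1 && c1.2 == c2.2) = true := by
        simp only [Bool.and_eq_true, beq_iff_eq]
        rintro ⟨h1, h2⟩
        exact h (Prod.ext h1 h2)
      simp [this, h]

-- A is "every element of l1 is a member of l2".
lemma portA_eq (l1 l2 : List (Int × Int)) :
    compareLCoords l1 l2 = decide (∀ c ∈ l1, c ∈ l2) := by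
  induction l1 with
  | nil => simp [compareLCoords]
  | cons c1 rest ih =>
    simp only [compareLCoords, ih, inner_eq_mem]
    by_cases h : c1 ∈ l2 <;> simp [h]

-- membership in the pending set after folding discard over a list
lemma mem_foldl_discard (l : List (Int × Int)) (p : PySem.Set (Int × Int)) (x : Int × Int) :
    x ∈ l.foldl (fun s c => PySem.Set.discard s (c.1, c.2)) p ↔ x ∈ p ∧ x ∉ l := by
  induction l generalizing p with
  | nil => simp
  | cons c rest ih =>
    simp only [List.foldl_cons, ih, PySem.Set.mem_discard, List.mem_cons]
    constructor
    · rintro ⟨⟨hp, hne⟩, hrest⟩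
      refine ⟨hp, ?_⟩
      rintro (h | h)
      · exact hne (by simp [h])
      · exact hrest h
    · rintro ⟨hp, hn⟩
      exact ⟨⟨hp, fun h => hn (Or.inl (by cases x; cases c; simpa using h))⟩,
             fun h => hn (Or.inr h)⟩

lemma discard_isEmpty_stable (l : List (Int × Int)) (p : PySem.Set (Int × Int))
    (hp : p.isEmpty = true) :
    (l.foldl (fun s c => PySem.Set.discard s (c.1, c.2)) p).isEmpty = true := by
  induction l generalizing p with
  | nil => exact hp
  | cons c rest ih =>
    simp only [List.foldl_cons]
    apply ih
    rw [List.isEmpty_iff] at hp ⊢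
    simp [hp, PySem.Set.discard]

-- the early-return loop equals emptiness of the full fold
lemma altLoop_eq_foldl (l : List (Int × Int)) (p : PySem.Set (Int × Int)) :
    compareLCoordsAltLoop p l = (l.foldl (fun s c => PySem.Set.discard s (c.1, c.2)) p).isEmpty := by
  induction l generalizing p with
  | nil => rfl
  | cons c rest ih =>
    simp only [compareLCoordsAltLoop, List.foldl_cons]
    by_cases h : (PySem.Set.discard p (c.1, c.2)).isEmpty = true
    · simp [h, discard_isEmpty_stable rest _ h]
    · simp [h, ih]

lemma main_eq (l1 l2 : List (Int × Int)) :
    compareLCoords l1 l2 = compareLCoords_alt l1 l2 := by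
  rw [portA_eq]
  unfold compareLCoords_alt
  rw [altLoop_eq_foldl]
  have hmap : l1.map (fun c => (c.1, c.2)) = l1 := by simp
  rw [hmap]
  by_cases hall : ∀ c ∈ l1, c ∈ l2
  · have he : l2.foldl (fun s c => PySem.Set.discard s (c.1, c.2)) (PySem.Set.ofList l1) = [] := by
      rw [List.eq_nil_iff_forall_not_mem]
      intro x hx
      rw [mem_foldl_discard, PySem.Set.mem_ofList] at hx
      exact hx.2 (hall x hx.1)
    simp only [he, List.isEmpty_nil, decide_eq_true_iff]
    exact hall
  · rw [not_forall] at hall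
    simp only [not_forall, exists_prop] at hall
    obtain ⟨c, hc, hcn⟩ := hall
    have hx : c ∈ l2.foldl (fun s c => PySem.Set.discard s (c.1, c.2)) (PySem.Set.ofList l1) :=
      (mem_foldl_discard l2 _ c).2 ⟨(by rw [PySem.Set.mem_ofList]; exact hc), hcn⟩
    have hne : (l2.foldl (fun s c => PySem.Set.discard s (c.1, c.2)) (PySem.Set.ofList l1)).isEmpty = false := by
      rw [List.isEmpty_eq_false_iff]
      exact List.ne_nil_of_mem hx
    simp only [hne, decide_eq_false_iff_not]
    intro h
    exact hcn (h c hc)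

-- ===== VERDICT (by name: the statement is the Claim_ definition above) =====
theorem compareLCoords_spec : Claim_equal_compareLCoords := by
  intro l1 l2 _
  exact main_eq l1 l2
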